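-- pv_equiv track=rewrite | github.com/hoxbro/holoviz-tools | scripts/changelog.py | sort_contributors
-- ===== SOURCE A (Python) =====
-- ME = "hoxbro"
--
-- def sort_contributors(contributors_set, new_contributors_set):
--     # Separate new and existing contributors
--     new_users = [user for user in contributors_set if user in new_contributors_set and user != ME]
--     existing_users = [
--         user for user in contributors_set if user not in new_contributors_set and user != ME
--     ]
--
--     new_users_sorted = sorted(new_users, key=lambda x: x.lower())
--     existing_users_sorted = sorted(existing_users, key=lambda x: x.lower())
--
--     result = new_users_sorted + existing_users_sorted
--     if ME in contributors_set:
--         result.append(ME)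
--
--     return result
-- ===== SOURCE B (Python) =====
-- ME = "hoxbro"
--
-- def sort_contributors(contributors_set, new_contributors_set):
--     def rank(user):
--         if user == ME:
--             return 2
--         return 0 if user in new_contributors_set else 1
--     return sorted(contributors_set, key=lambda u: (rank(u), u.lower()))
-- ===== Notes on version B (the rewrite author's own statement) =====
-- stated objective: simpler
-- what changed: Replaces A's two filter passes, two separate sorts, concatenation and conditional append of ME by a single stable sort of contributors_set under the composite key (rank(user), user.lower()) with rank 0 = new, 1 = existing, 2 = ME. Pre_ excludes lists in which ME 'hoxbro' occurs more than once (the arguments are Python sets, so duplicates never arise): there A collapses the duplicates to a single trailing ME while B keeps each occurrence.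
import Mathlib
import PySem

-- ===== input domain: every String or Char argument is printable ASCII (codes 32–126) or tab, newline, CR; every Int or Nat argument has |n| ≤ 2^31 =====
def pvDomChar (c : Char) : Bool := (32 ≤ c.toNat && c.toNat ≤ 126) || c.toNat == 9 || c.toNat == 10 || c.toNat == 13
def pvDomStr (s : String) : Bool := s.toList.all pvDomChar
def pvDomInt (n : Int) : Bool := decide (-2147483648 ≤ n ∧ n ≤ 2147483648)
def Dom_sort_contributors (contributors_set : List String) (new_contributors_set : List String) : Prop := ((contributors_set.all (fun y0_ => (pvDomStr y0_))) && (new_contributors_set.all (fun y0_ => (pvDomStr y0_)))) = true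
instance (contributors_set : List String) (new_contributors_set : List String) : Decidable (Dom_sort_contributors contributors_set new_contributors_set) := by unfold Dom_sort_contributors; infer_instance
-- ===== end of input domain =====

-- B replaces A's two filter passes, two sorts, concatenation and conditional append of ME
-- by one stable sort under the composite key (rank, lowercased name); objective: simpler.


-- ===== PORT A =====
def pvME : String := "hoxbro"

def sort_contributors (contributors_set : List String) (new_contributors_set : List String) : List String :=
  let new_users := contributors_set.filter (fun user => new_contributors_set.contains user && user ≠ pvME)
  let existing_users := contributors_set.filter (fun user => !new_contributors_set.contains user && user ≠ pvME)
  let new_users_sorted := PySem.List.sorted new_users (fun x => PySem.Str.lower x) false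
  let existing_users_sorted := PySem.List.sorted existing_users (fun x => PySem.Str.lower x) false
  let result := new_users_sorted ++ existing_users_sorted
  if contributors_set.contains pvME then result ++ [pvME] else result

-- ===== PORT B =====
def pvRank (new_contributors_set : List String) (user : String) : Int :=
  if user = pvME then 2
  else if new_contributors_set.contains user then 0 else 1

def sort_contributors_alt (contributors_set : List String) (new_contributors_set : List String) : List String :=
  PySem.List.sorted2 contributors_set (fun u => pvRank new_contributors_set u) (fun u => PySem.Str.lower u) false

-- ===== PRECONDITION & SPEC =====
-- Pre_ excludes lists in which ME "hoxbro" occurs more than once (the arguments are Python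
-- sets, so duplicates never arise): there A collapses the duplicates to one trailing ME
-- while B keeps each occurrence; on a set-like input both behave identically.
def Pre_sort_contributors (contributors_set : List String) (new_contributors_set : List String) : Prop :=
  contributors_set.count pvME ≤ 1

instance (contributors_set : List String) (new_contributors_set : List String) : Decidable (Pre_sort_contributors contributors_set new_contributors_set) := by unfold Pre_sort_contributors; infer_instance

def pvWitness_sort_contributors : List String × List String :=
  (["Bob", "alice", "hoxbro", "Carl"], ["Carl", "alice"])

def Spec_sort_contributors (contributors_set : List String) (new_contributors_set : List String) (out : List String) : Prop := out = sort_contributors_alt contributors_set new_contributors_set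
instance (contributors_set : List String) (new_contributors_set : List String) (out : List String) : Decidable (Spec_sort_contributors contributors_set new_contributors_set out) := by unfold Spec_sort_contributors; infer_instance

-- ===== CLAIM (what is proved, stated in full; the proofs are below) =====
def Claim_equal_sort_contributors : Prop := ∀ (contributors_set : List String) (new_contributors_set : List String), Dom_sort_contributors contributors_set new_contributors_set → Pre_sort_contributors contributors_set new_contributors_set → Spec_sort_contributors contributors_set new_contributors_set (sort_contributors contributors_set new_contributors_set)

-- ===== LEMMAS AND PROOFS =====

-- inserting x before everything in R lands inside (or at the end of) A
theorem pv_insertBy_append_before {α : Type} (before : α → α → Bool) (x : α) (A R : List α)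
    (h : ∀ y ∈ R, before x y = true) :
    PySem.List.insertBy before x (A ++ R) = PySem.List.insertBy before x A ++ R := by
  induction A with
  | nil =>
    cases R with
    | nil => simp [PySem.List.insertBy]
    | cons r rs => simp [PySem.List.insertBy, h r (by simp)]
  | cons a A ih =>
    simp only [List.cons_append, PySem.List.insertBy]
    by_cases hb : before x a = true
    · simp [hb]
    · simp only [Bool.not_eq_true] at hb
      simp [hb, ih]

-- x goes before nothing in A: insertion skips past A
theorem pv_insertBy_append_after {α : Type} (before : α → α → Bool) (x : α) (A R : List α)
    (h : ∀ y ∈ A, before x y = false) :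
    PySem.List.insertBy before x (A ++ R) = A ++ PySem.List.insertBy before x R := by
  induction A with
  | nil => simp
  | cons a A ih =>
    simp only [List.cons_append, PySem.List.insertBy, h a (by simp)]
    simp only [Bool.false_eq_true, if_false, List.cons.injEq, true_and]
    exact ih (fun y hy => h y (by simp [hy]))

theorem pv_insertBy_congr {α : Type} (b1 b2 : α → α → Bool) (x : α) (l : List α)
    (h : ∀ y ∈ l, b1 x y = b2 x y) :
    PySem.List.insertBy b1 x l = PySem.List.insertBy b2 x l := by
  induction l with
  | nil => rfl
  | cons a l ih =>
    simp only [PySem.List.insertBy, h a (by simp)]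
    split_ifs with hb
    · rfl
    · simp [ih (fun y hy => h y (by simp [hy]))]

-- a stable sort under key (rank, k) is the concatenation of the per-rank stable sorts under k
theorem pv_sorted2_rank_split {α κ : Type} [LinearOrder κ]
    (r : α → Int) (k : α → κ) (xs : List α)
    (hr : ∀ x ∈ xs, r x = 0 ∨ r x = 1 ∨ r x = 2) :
    PySem.List.sorted2 xs r k false =
      PySem.List.sorted (xs.filter (fun x => r x = 0)) k false ++
      PySem.List.sorted (xs.filter (fun x => r x = 1)) k false ++
      PySem.List.sorted (xs.filter (fun x => r x = 2)) k false := by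
  induction xs using List.reverseRecOn with
  | nil => rfl
  | append_singleton ys x ih =>
    have hys : ∀ y ∈ ys, r y = 0 ∨ r y = 1 ∨ r y = 2 := fun y hy => hr y (by simp [hy])
    have hx := hr x (by simp)
    -- peel the last insertion off both sides
    have h2 : PySem.List.sorted2 (ys ++ [x]) r k false =
        PySem.List.insertBy
          (fun a b => decide (r a < r b) || (!decide (r b < r a) && decide (k a < k b)))
          x (PySem.List.sorted2 ys r k false) := by
      simp [PySem.List.sorted2, List.foldl_append]
    have h1 : ∀ (l : List α),
        PySem.List.sorted (l ++ [x]) k false =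
        PySem.List.insertBy (fun a b => decide (k a < k b)) x (PySem.List.sorted l k false) := by
      intro l; simp [PySem.List.sorted, List.foldl_append]
    set b2 : α → α → Bool :=
      fun a b => decide (r a < r b) || (!decide (r b < r a) && decide (k a < k b)) with hb2
    set bk : α → α → Bool := fun a b => decide (k a < k b) with hbk
    set A := PySem.List.sorted (ys.filter (fun y => r y = 0)) k false with hA
    set B := PySem.List.sorted (ys.filter (fun y => r y = 1)) k false with hB
    set C := PySem.List.sorted (ys.filter (fun y => r y = 2)) k false with hC
    have memA : ∀ y ∈ A, r y = 0 := by
      intro y hy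
      have := (PySem.List.mem_sorted (xs := ys.filter (fun y => r y = 0))
        (key := k) (rev := false) (x := y)).mp hy
      simpa using (List.of_mem_filter this)
    have memB : ∀ y ∈ B, r y = 1 := by
      intro y hy
      have := (PySem.List.mem_sorted (xs := ys.filter (fun y => r y = 1))
        (key := k) (rev := false) (x := y)).mp hy
      simpa using (List.of_mem_filter this)
    have memC : ∀ y ∈ C, r y = 2 := by
      intro y hy
      have := (PySem.List.mem_sorted (xs := ys.filter (fun y => r y = 2))
        (key := k) (rev := false) (x := y)).mp hy
      simpa using (List.of_mem_filter this)
    rw [h2, ih hys]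
    rcases hx with hx | hx | hx
    · -- x is new: it is inserted inside A
      have hfR : ∀ y ∈ B ++ C, b2 x y = true := by
        intro y hy
        rcases List.mem_append.mp hy with hy | hy
        · simp [hb2, hx, memB y hy]
        · simp [hb2, hx, memC y hy]
      rw [List.append_assoc, pv_insertBy_append_before b2 x A (B ++ C) hfR,
        pv_insertBy_congr b2 bk x A (fun y hy => by simp [hb2, hbk, hx, memA y hy])]
      have : (ys ++ [x]).filter (fun y => r y = 0) = ys.filter (fun y => r y = 0) ++ [x] := by
        simp [List.filter_append, hx]
      rw [this, h1]
      have h1' : (ys ++ [x]).filter (fun y => r y = 1) = ys.filter (fun y => r y = 1) := by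
        simp [List.filter_append, hx]
      have h2' : (ys ++ [x]).filter (fun y => r y = 2) = ys.filter (fun y => r y = 2) := by
        simp [List.filter_append, hx]
      rw [h1', h2', ← hA, ← hB, ← hC, List.append_assoc]
    · -- x is existing: skipped past A, inserted inside B
      have hfA : ∀ y ∈ A, b2 x y = false := by
        intro y hy; simp [hb2, hx, memA y hy]
      have hfC : ∀ y ∈ C, b2 x y = true := by
        intro y hy; simp [hb2, hx, memC y hy]
      rw [List.append_assoc, pv_insertBy_append_after b2 x A (B ++ C) hfA,
        pv_insertBy_append_before b2 x B C hfC,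
        pv_insertBy_congr b2 bk x B (fun y hy => by simp [hb2, hbk, hx, memB y hy])]
      have : (ys ++ [x]).filter (fun y => r y = 1) = ys.filter (fun y => r y = 1) ++ [x] := by
        simp [List.filter_append, hx]
      rw [this, h1]
      have h0' : (ys ++ [x]).filter (fun y => r y = 0) = ys.filter (fun y => r y = 0) := by
        simp [List.filter_append, hx]
      have h2' : (ys ++ [x]).filter (fun y => r y = 2) = ys.filter (fun y => r y = 2) := by
        simp [List.filter_append, hx]
      rw [h0', h2', ← hA, ← hB, ← hC, List.append_assoc]
    · -- x is ME: skipped past A and B, inserted inside C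
      have hfAB : ∀ y ∈ A ++ B, b2 x y = false := by
        intro y hy
        rcases List.mem_append.mp hy with hy | hy
        · simp [hb2, hx, memA y hy]
        · simp [hb2, hx, memB y hy]
      rw [List.append_assoc, ← List.append_assoc A B C,
        pv_insertBy_append_after b2 x (A ++ B) C hfAB,
        pv_insertBy_congr b2 bk x C (fun y hy => by simp [hb2, hbk, hx, memC y hy])]
      have : (ys ++ [x]).filter (fun y => r y = 2) = ys.filter (fun y => r y = 2) ++ [x] := by
        simp [List.filter_append, hx]
      rw [this, h1]
      have h0' : (ys ++ [x]).filter (fun y => r y = 0) = ys.filter (fun y => r y = 0) := by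
        simp [List.filter_append, hx]
      have h1' : (ys ++ [x]).filter (fun y => r y = 1) = ys.filter (fun y => r y = 1) := by
        simp [List.filter_append, hx]
      rw [h0', h1', ← hA, ← hB, ← hC, List.append_assoc]

-- ===== VERDICT (by name: the statement is the Claim_ definition above) =====
theorem sort_contributors_spec : Claim_equal_sort_contributors := by
  intro cs ns _hdom hpre
  unfold Spec_sort_contributors sort_contributors sort_contributors_alt
  rw [pv_sorted2_rank_split (fun u => pvRank ns u) (fun u => PySem.Str.lower u) cs
    (by intro x _; simp only [pvRank]; split_ifs <;> simp)]
  have hf0 : cs.filter (fun u => pvRank ns u = 0)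
      = cs.filter (fun user => ns.contains user && user ≠ pvME) := by
    apply List.filter_congr; intro x _
    simp only [pvRank]
    by_cases h1 : x = pvME <;> by_cases h2 : x ∈ ns <;> simp [h1, h2]
  have hf1 : cs.filter (fun u => pvRank ns u = 1)
      = cs.filter (fun user => !ns.contains user && user ≠ pvME) := by
    apply List.filter_congr; intro x _
    simp only [pvRank]
    by_cases h1 : x = pvME <;> by_cases h2 : x ∈ ns <;> simp [h1, h2]
  have hf2 : cs.filter (fun u => pvRank ns u = 2) = cs.filter (fun u => u == pvME) := by
    apply List.filter_congr; intro x _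
    simp only [pvRank]
    by_cases h1 : x = pvME <;> by_cases h2 : x ∈ ns <;> simp [h1, h2]
  have hme : cs.filter (fun u => u == pvME) = List.replicate (cs.count pvME) pvME := by
    simp [List.filter_beq]
  rw [hf0, hf1, hf2, hme]
  unfold Pre_sort_contributors at hpre
  by_cases hmem : pvME ∈ cs
  · have hc1 : cs.count pvME = 1 := by
      have : 1 ≤ cs.count pvME := List.one_le_count_iff.mpr hmem
      omega
    simp [hmem, hc1, List.append_assoc, PySem.List.sorted, PySem.List.insertBy]
  · have hc0 : cs.count pvME = 0 := List.count_eq_zero.mpr hmem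
    simp [hmem, hc0, PySem.List.sorted]
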